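-- pv_equiv track=rewrite | github.com/xuyus/onnxsharp | viz/sample.py | check_range_overlap
-- ===== SOURCE A (Python) =====
-- from typing import List, Tuple
--
-- def check_range_overlap(
--     range_set_1: List[Tuple[int, int]],
--     lengh_1: int,
--     range_set_2: List[Tuple[int, int]],
--     length_2: int,
-- ):
--     """For each range in range_set_1, check if it overlaps with any range in range_set_2"""
--     for s1 in range_set_1:
--         e1 = s1 + lengh_1 - 1
--         for s2 in range_set_2:
--             e2 = s2 + length_2 - 1
--             if not (e1 < s2 or e2 < s1):
--                 return True
--
--     return False
-- ===== SOURCE B (Python) =====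
-- def check_range_overlap(range_set_1, lengh_1, range_set_2, length_2):
--     """Alternative algorithm: sort range_set_2 once; for each s1 binary-search the
--     smallest start that could still overlap and test only that one candidate."""
--     t = sorted(range_set_2)
--     n = len(t)
--     for s1 in range_set_1:
--         x = s1 - length_2 + 1  # smallest s2 whose range can reach s1
--         lo, hi = 0, n
--         while lo < hi:
--             mid = (lo + hi) // 2
--             if t[mid] < x:
--                 lo = mid + 1
--             else:
--                 hi = mid
--         if lo < n and t[lo] <= s1 + lengh_1 - 1:
--             return True
--     return False
-- ===== Notes on version B (the rewrite author's own statement) =====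
-- stated objective: alternative
-- what changed: Replaces the nested all-pairs scan by sorting range_set_2 once and, for each s1, binary-searching the single smallest candidate start s2 >= s1 - length_2 + 1 and checking it against s1 + lengh_1 - 1; asymptotically O((n+m) log m) work vs A's O(n*m), though A's early exit makes it as fast in practice on overlap-rich inputs.
import Mathlib
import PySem

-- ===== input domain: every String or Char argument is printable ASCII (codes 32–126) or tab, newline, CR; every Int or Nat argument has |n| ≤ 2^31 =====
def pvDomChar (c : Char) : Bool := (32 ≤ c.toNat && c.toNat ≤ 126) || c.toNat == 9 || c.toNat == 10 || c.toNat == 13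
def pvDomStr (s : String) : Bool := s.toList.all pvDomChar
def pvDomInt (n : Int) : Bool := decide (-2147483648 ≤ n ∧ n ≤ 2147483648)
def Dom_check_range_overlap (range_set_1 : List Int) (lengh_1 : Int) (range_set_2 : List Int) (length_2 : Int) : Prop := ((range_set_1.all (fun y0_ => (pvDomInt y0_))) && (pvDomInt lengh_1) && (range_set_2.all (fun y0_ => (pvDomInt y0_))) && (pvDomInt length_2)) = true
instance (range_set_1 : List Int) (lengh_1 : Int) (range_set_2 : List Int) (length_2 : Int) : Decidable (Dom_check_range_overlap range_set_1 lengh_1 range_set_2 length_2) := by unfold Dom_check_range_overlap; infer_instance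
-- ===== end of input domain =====

-- B sorts range_set_2 once and binary-searches one candidate per s1 instead of scanning all pairs (alternative algorithm, same measured cost).

-- ===== PORT A =====
-- inner 'for s2 in range_set_2' loop with early return
def crA_inner (lengh_2 : Int) (s1 e1 : Int) : List Int → Bool
  | [] => false
  | s2 :: rest =>
      let e2 := s2 + lengh_2 - 1
      if !(decide (e1 < s2) || decide (e2 < s1)) then true
      else crA_inner lengh_2 s1 e1 rest

-- outer 'for s1 in range_set_1' loop with early return
def crA_outer (lengh_1 lengh_2 : Int) (range_set_2 : List Int) : List Int → Bool
  | [] => false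
  | s1 :: rest =>
      let e1 := s1 + lengh_1 - 1
      if crA_inner lengh_2 s1 e1 range_set_2 then true
      else crA_outer lengh_1 lengh_2 range_set_2 rest

def check_range_overlap (range_set_1 : List Int) (lengh_1 : Int) (range_set_2 : List Int) (length_2 : Int) : Bool :=
  crA_outer lengh_1 length_2 range_set_2 range_set_1

-- ===== PORT B =====
-- hand-written bisect_left while-loop from Source B; lo/hi stay nonnegative in Python, so Nat with '/2' matches '//2' exactly
def crB_bisect (t : List Int) (x : Int) (lo hi : Nat) : Nat :=
  if lo < hi then
    let mid := (lo + hi) / 2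
    if t.getD mid 0 < x then crB_bisect t x (mid + 1) hi
    else crB_bisect t x lo mid
  else lo
termination_by hi - lo
decreasing_by all_goals omega

-- 'for s1 in range_set_1' loop of Source B
def crB_loop (t : List Int) (lengh_1 lengh_2 : Int) : List Int → Bool
  | [] => false
  | s1 :: rest =>
      let i := crB_bisect t (s1 - lengh_2 + 1) 0 t.length
      if decide (i < t.length) && decide (t.getD i 0 ≤ s1 + lengh_1 - 1) then true
      else crB_loop t lengh_1 lengh_2 rest

def check_range_overlap_alt (range_set_1 : List Int) (lengh_1 : Int) (range_set_2 : List Int) (length_2 : Int) : Bool :=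
  let t := PySem.List.sorted range_set_2 (fun x => x) false
  crB_loop t lengh_1 length_2 range_set_1

-- ===== PRECONDITION & SPEC =====
def Spec_check_range_overlap (range_set_1 : List Int) (lengh_1 : Int) (range_set_2 : List Int) (length_2 : Int) (out : Bool) : Prop := out = check_range_overlap_alt range_set_1 lengh_1 range_set_2 length_2
instance (range_set_1 : List Int) (lengh_1 : Int) (range_set_2 : List Int) (length_2 : Int) (out : Bool) : Decidable (Spec_check_range_overlap range_set_1 lengh_1 range_set_2 length_2 out) := by unfold Spec_check_range_overlap; infer_instance

-- ===== CLAIM (what is proved, stated in full; the proofs are below) =====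
def Claim_equal_check_range_overlap : Prop := ∀ (range_set_1 : List Int) (lengh_1 : Int) (range_set_2 : List Int) (length_2 : Int), Dom_check_range_overlap range_set_1 lengh_1 range_set_2 length_2 → Spec_check_range_overlap range_set_1 lengh_1 range_set_2 length_2 (check_range_overlap range_set_1 lengh_1 range_set_2 length_2)

-- ===== LEMMAS AND PROOFS =====

-- the inner scan is an existence test for s2 ∈ rs2 in the window [s1-l2+1, s1+l1-1]
lemma crA_inner_iff (l2 s1 e1 : Int) (rs2 : List Int) :
    crA_inner l2 s1 e1 rs2 = true ↔ ∃ s2 ∈ rs2, s1 - l2 + 1 ≤ s2 ∧ s2 ≤ e1 := by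
  induction rs2 with
  | nil => simp [crA_inner]
  | cons s2 rest ih =>
      by_cases hcond : e1 < s2 ∨ s2 + l2 - 1 < s1
      · have hb : (!(decide (e1 < s2) || decide (s2 + l2 - 1 < s1))) = false := by
          rcases hcond with h | h <;> simp [h]
        simp only [crA_inner, hb, Bool.false_eq_true, if_false, ih, List.mem_cons]
        constructor
        · rintro ⟨y, hy, h⟩; exact ⟨y, Or.inr hy, h⟩
        · rintro ⟨y, (rfl | hy), h1, h2⟩
          · omega
          · exact ⟨y, hy, h1, h2⟩
      · have hc1 : ¬ (e1 < s2) := fun h => hcond (Or.inl h)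
        have hc2 : ¬ (s2 + l2 - 1 < s1) := fun h => hcond (Or.inr h)
        have hb : (!(decide (e1 < s2) || decide (s2 + l2 - 1 < s1))) = true := by
          simp [hc1, hc2]
        simp only [crA_inner, hb, if_true, List.mem_cons]
        exact ⟨fun _ => ⟨s2, Or.inl rfl, by omega, by omega⟩, fun _ => trivial⟩

-- invariant proof for the hand-written bisect_left loop
lemma crB_bisect_spec (t : List Int) (hs : t.Pairwise (· ≤ ·)) (x : Int) :
    ∀ (lo hi : Nat), lo ≤ hi → hi ≤ t.length →
    lo ≤ crB_bisect t x lo hi ∧ crB_bisect t x lo hi ≤ hi ∧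
    (∀ j, lo ≤ j → j < crB_bisect t x lo hi → t.getD j 0 < x) ∧
    (∀ j, crB_bisect t x lo hi ≤ j → j < hi → x ≤ t.getD j 0) := by
  have hmono : ∀ p q, p ≤ q → q < t.length → t.getD p 0 ≤ t.getD q 0 := by
    intro p q hpq hq
    rcases Nat.eq_or_lt_of_le hpq with h | h
    · subst h; exact le_refl _
    · have := (List.pairwise_iff_getElem).1 hs p q (by omega) hq h
      rwa [List.getD_eq_getElem t 0 (by omega), List.getD_eq_getElem t 0 hq]
  intro lo hi
  induction hn : hi - lo using Nat.strong_induction_on generalizing lo hi with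
  | _ n ih =>
    intro hlohi hhi
    rw [crB_bisect]
    by_cases hlt : lo < hi
    · simp only [hlt, if_true]
      have hmid : (lo + hi) / 2 < hi := by omega
      have hmidlo : lo ≤ (lo + hi) / 2 := by omega
      by_cases hm : t.getD ((lo + hi) / 2) 0 < x
      · simp only [hm, if_true]
        obtain ⟨h1, h2, h3, h4⟩ :=
          ih (hi - ((lo + hi) / 2 + 1)) (by omega) ((lo + hi) / 2 + 1) hi rfl (by omega) hhi
        refine ⟨by omega, h2, ?_, h4⟩
        intro j hj1 hj2
        by_cases hjm : j ≤ (lo + hi) / 2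
        · exact lt_of_le_of_lt (hmono j _ hjm (by omega)) hm
        · exact h3 j (by omega) hj2
      · simp only [hm, if_false]
        obtain ⟨h1, h2, h3, h4⟩ :=
          ih ((lo + hi) / 2 - lo) (by omega) lo ((lo + hi) / 2) rfl (by omega) (by omega)
        refine ⟨h1, by omega, h3, ?_⟩
        intro j hj1 hj2
        by_cases hjm : j < (lo + hi) / 2
        · exact h4 j hj1 hjm
        · exact le_trans (not_lt.1 hm) (hmono _ j (by omega) (by omega))
    · simp only [hlt, if_false]
      exact ⟨le_refl _, by omega, fun j hj1 hj2 => absurd hj2 (by omega),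
             fun j hj1 hj2 => absurd hj2 (by omega)⟩

-- per-s1: the bisect check of B equals A's inner scan, for any sorted rearrangement t of rs2
lemma crB_check_eq (rs2 t : List Int) (hs : t.Pairwise (· ≤ ·)) (hperm : t.Perm rs2)
    (l1 l2 s1 : Int) :
    (decide (crB_bisect t (s1 - l2 + 1) 0 t.length < t.length) &&
     decide (t.getD (crB_bisect t (s1 - l2 + 1) 0 t.length) 0 ≤ s1 + l1 - 1)) =
    crA_inner l2 s1 (s1 + l1 - 1) rs2 := by
  have hmem : ∀ y, y ∈ t ↔ y ∈ rs2 := fun y => hperm.mem_iff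
  set x := s1 - l2 + 1 with hx
  set i := crB_bisect t x 0 t.length with hi
  obtain ⟨-, h2, h3, h4⟩ := crB_bisect_spec t hs x 0 t.length (Nat.zero_le _) (le_refl _)
  rw [← hi] at h2 h3 h4
  by_cases hres : (∃ s2 ∈ rs2, x ≤ s2 ∧ s2 ≤ s1 + l1 - 1)
  · rw [(crA_inner_iff l2 s1 _ rs2).2 hres]
    obtain ⟨s2, hs2, hxle, hsle⟩ := hres
    obtain ⟨j, hj, hjget⟩ := List.getElem_of_mem ((hmem s2).2 hs2)
    have hjd : t.getD j 0 = s2 := by rw [List.getD_eq_getElem t 0 hj, hjget]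
    have hij : i ≤ j := by
      by_contra hc
      have := h3 j (Nat.zero_le _) (not_le.1 hc)
      omega
    have hilen : i < t.length := lt_of_le_of_lt hij hj
    have hle : t.getD i 0 ≤ t.getD j 0 := by
      rcases Nat.eq_or_lt_of_le hij with h | h
      · subst h; exact le_refl _
      · have := (List.pairwise_iff_getElem).1 hs i j hilen hj h
        rwa [List.getD_eq_getElem t 0 hilen, List.getD_eq_getElem t 0 hj]
    rw [decide_eq_true hilen, decide_eq_true (show t.getD i 0 ≤ s1 + l1 - 1 by omega)]
    rfl
  · rw [show crA_inner l2 s1 (s1 + l1 - 1) rs2 = false by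
      rw [← Bool.not_eq_true, crA_inner_iff]; exact hres]
    by_cases hilen : i < t.length
    · have hxi : x ≤ t.getD i 0 := h4 i (le_refl _) hilen
      have hti : t.getD i 0 ∈ t := by
        rw [List.getD_eq_getElem t 0 hilen]; exact List.getElem_mem hilen
      have : ¬ (t.getD i 0 ≤ s1 + l1 - 1) := fun hc =>
        hres ⟨t.getD i 0, (hmem _).1 hti, hxi, hc⟩
      rw [decide_eq_false this, Bool.and_false]
    · rw [decide_eq_false hilen, Bool.false_and]

-- ===== VERDICT (by name: the statement is the Claim_ definition above) =====
theorem check_range_overlap_spec : Claim_equal_check_range_overlap := by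
  intro rs1 l1 rs2 l2 hdom
  clear hdom
  unfold Spec_check_range_overlap check_range_overlap check_range_overlap_alt
  show crA_outer l1 l2 rs2 rs1 =
    crB_loop (PySem.List.sorted rs2 (fun x => x) false) l1 l2 rs1
  have hs : (PySem.List.sorted rs2 (fun x => x) false).Pairwise (· ≤ ·) :=
    PySem.List.sorted_pairwise rs2 (fun x => x)
  have hperm : (PySem.List.sorted rs2 (fun x => x) false).Perm rs2 :=
    PySem.List.sorted_perm rs2 (fun x => x) false
  induction rs1 with
  | nil => rfl
  | cons s1 rest ih =>
      simp only [crA_outer, crB_loop]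
      rw [crB_check_eq rs2 _ hs hperm l1 l2 s1]
      split
      · rfl
      · exact ih
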